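-- pv_equiv track=rewrite | github.com/Yadavabhimanyu/movie_review | app.py | sentiment
-- ===== SOURCE A (Python) =====
-- def sentiment(x):
--     n = 0
--     p = 0
--     for i in x:
--         if i == 'negative':
--             n = n + 1
--         else:
--             p = p + 1
--     return n, p
-- ===== SOURCE B (Python) =====
-- def sentiment(x):
--     items = list(x)
--     if not items:
--         return 0, 0
--     if len(items) == 1:
--         return (1, 0) if items[0] == 'negative' else (0, 1)
--     mid = len(items) // 2
--     n1, p1 = sentiment(items[:mid])
--     n2, p2 = sentiment(items[mid:])
--     return n1 + n2, p1 + p2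
-- ===== Notes on version B (the rewrite author's own statement) =====
-- stated objective: alternative
-- what changed: Replaces the single accumulating loop with a divide-and-conquer recursion: split the list at the midpoint, count each half recursively, and add the pairs.
import Mathlib
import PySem

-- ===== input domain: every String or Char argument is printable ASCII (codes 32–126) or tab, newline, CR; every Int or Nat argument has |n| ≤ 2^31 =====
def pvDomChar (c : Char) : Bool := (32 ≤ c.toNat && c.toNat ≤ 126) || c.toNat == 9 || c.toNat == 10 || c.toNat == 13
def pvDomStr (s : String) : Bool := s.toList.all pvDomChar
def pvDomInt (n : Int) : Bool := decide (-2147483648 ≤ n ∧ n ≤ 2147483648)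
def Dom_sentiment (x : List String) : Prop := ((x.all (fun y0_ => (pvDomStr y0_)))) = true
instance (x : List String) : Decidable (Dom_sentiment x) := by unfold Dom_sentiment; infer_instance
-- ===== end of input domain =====

-- B replaces A's single accumulating loop with a divide-and-conquer midpoint split; objective: alternative decomposition, same cost.


-- ===== PORT A =====
def sentiment (x : List String) : Int × Int :=
  x.foldl (fun (np : Int × Int) i =>
    if i = "negative" then (np.1 + 1, np.2) else (np.1, np.2 + 1)) (0, 0)

-- ===== PORT B =====
def sentiment_alt : List String → Int × Int
  | [] => (0, 0)
  | [a] => if a = "negative" then ((1 : Int), (0 : Int)) else ((0 : Int), (1 : Int))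
  | a :: b :: t =>
    let items := a :: b :: t
    let mid := items.length / 2
    let l := sentiment_alt (items.take mid)
    let r := sentiment_alt (items.drop mid)
    (l.1 + r.1, l.2 + r.2)
termination_by l => l.length
decreasing_by
  · simp [List.length_take]; omega
  · simp; omega

-- ===== PRECONDITION & SPEC =====
def Spec_sentiment (x : List String) (out : Int × Int) : Prop := out = sentiment_alt x
instance (x : List String) (out : Int × Int) : Decidable (Spec_sentiment x out) := by unfold Spec_sentiment; infer_instance

-- ===== CLAIM (what is proved, stated in full; the proofs are below) =====
def Claim_equal_sentiment : Prop := ∀ (x : List String), Dom_sentiment x → Spec_sentiment x (sentiment x)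

-- ===== LEMMAS AND PROOFS =====
lemma sentiment_alt_count_aux (N : Nat) :
    ∀ (x : List String), x.length ≤ N →
      sentiment_alt x = ((x.count "negative" : Int), ((x.length : Int) - (x.count "negative" : Int))) := by
  induction N with
  | zero =>
    intro x hx
    have : x = [] := List.eq_nil_of_length_eq_zero (Nat.le_zero.mp hx)
    subst this; simp [sentiment_alt]
  | succ N ih =>
    intro x hx
    match x with
    | [] => simp [sentiment_alt]
    | [a] => by_cases h : a = "negative" <;> simp [sentiment_alt, h]
    | a :: b :: t =>
      rw [sentiment_alt]
      have hlen : (a :: b :: t).length = t.length + 2 := by simp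
      have hmid1 : 1 ≤ (a :: b :: t).length / 2 := by omega
      have hmid2 : (a :: b :: t).length / 2 < (a :: b :: t).length := by omega
      have htl : ((a :: b :: t).take ((a :: b :: t).length / 2)).length ≤ N := by
        simp [List.length_take]; omega
      have hdl : ((a :: b :: t).drop ((a :: b :: t).length / 2)).length ≤ N := by
        simp [List.length_drop]; omega
      rw [ih _ htl, ih _ hdl]
      have hsplit := List.take_append_drop ((a :: b :: t).length / 2) (a :: b :: t)
      have hc : (a :: b :: t).count "negative"
          = ((a :: b :: t).take ((a :: b :: t).length / 2)).count "negative"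
            + ((a :: b :: t).drop ((a :: b :: t).length / 2)).count "negative" := by
        conv_lhs => rw [← hsplit]
        rw [List.count_append]
      have hl : (a :: b :: t).length
          = ((a :: b :: t).take ((a :: b :: t).length / 2)).length
            + ((a :: b :: t).drop ((a :: b :: t).length / 2)).length := by
        conv_lhs => rw [← hsplit]
        rw [List.length_append]
      dsimp only
      simp only [Prod.mk.injEq]
      constructor <;> omega

lemma sentiment_alt_count (x : List String) :
    sentiment_alt x = ((x.count "negative" : Int), ((x.length : Int) - (x.count "negative" : Int))) :=
  sentiment_alt_count_aux x.length x le_rfl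

lemma sentiment_loop (x : List String) (n p : Int) :
    x.foldl (fun (np : Int × Int) i =>
      if i = "negative" then (np.1 + 1, np.2) else (np.1, np.2 + 1)) (n, p)
      = (n + (x.count "negative" : Int), p + ((x.length : Int) - (x.count "negative" : Int))) := by
  induction x generalizing n p with
  | nil => simp
  | cons h t ih =>
    simp only [List.foldl_cons, List.count_cons]
    by_cases hh : h = "negative" <;> simp [hh, ih] <;> ring

-- ===== VERDICT (by name: the statement is the Claim_ definition above) =====
theorem sentiment_spec : Claim_equal_sentiment := by
  intro x _
  show sentiment x = sentiment_alt x
  rw [sentiment_alt_count]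
  simpa using sentiment_loop x 0 0
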